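-- pv_equiv track=rewrite | github.com/cloudspannerecosystem/app-migration-poc | embed_examples.py | get_un_embedded_strings
-- ===== SOURCE A (Python) =====
-- from typing import Dict, List, Set
--
-- Embeddings = List[Dict[str, int|str]]
--
-- def get_un_embedded_strings(examples_file: Embeddings, output_file: Embeddings) -> Set[str]:
--   strings = set()
--
--   for record in examples_file:
--     strings.add(record["example"])
--     strings.add(record["rewrite"])
--
--   for record in output_file:
--     if "example_embedding" in record and record["example"] in strings:
--       strings.remove(record["example"])
--     if "rewrite_embedding" in record and record["rewrite"] in strings:
--       strings.remove(record["rewrite"])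
--
--   return strings
-- ===== SOURCE B (Python) =====
-- def get_un_embedded_strings(examples_file, output_file):
--   embedded = set()
--   for record in output_file:
--     if "example_embedding" in record:
--       embedded.add(record["example"])
--     if "rewrite_embedding" in record:
--       embedded.add(record["rewrite"])
--   return {s for record in examples_file
--             for s in (record["example"], record["rewrite"])
--             if s not in embedded}
-- ===== Notes on version B (the rewrite author's own statement) =====
-- stated objective: simpler
-- what changed: B first indexes the embedded strings of output_file into one set, then builds the result in a single filtering set comprehension over examples_file, instead of A's build-then-conditionally-remove-in-place over a single mutated set.
import Mathlib
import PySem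

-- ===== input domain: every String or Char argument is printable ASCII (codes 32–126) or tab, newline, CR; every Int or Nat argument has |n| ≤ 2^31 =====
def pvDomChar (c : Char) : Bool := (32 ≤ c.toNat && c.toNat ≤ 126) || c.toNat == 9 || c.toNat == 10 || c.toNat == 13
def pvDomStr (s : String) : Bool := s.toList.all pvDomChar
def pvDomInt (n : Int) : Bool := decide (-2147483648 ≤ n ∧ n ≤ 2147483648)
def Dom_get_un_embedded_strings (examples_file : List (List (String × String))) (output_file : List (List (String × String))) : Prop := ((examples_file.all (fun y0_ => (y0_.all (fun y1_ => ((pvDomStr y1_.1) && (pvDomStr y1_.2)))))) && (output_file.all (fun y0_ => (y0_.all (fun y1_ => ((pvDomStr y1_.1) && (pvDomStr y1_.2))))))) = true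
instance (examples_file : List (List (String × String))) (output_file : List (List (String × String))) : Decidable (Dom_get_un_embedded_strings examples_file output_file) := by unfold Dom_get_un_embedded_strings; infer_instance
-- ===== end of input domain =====

-- B replaces A's build-then-conditionally-remove-in-place on one mutated set by indexing the
-- embedded strings of output_file into a set first and then one filtering set comprehension
-- over examples_file (objective: simpler).


-- ===== PORT A =====
-- Python set → PySem.Set; record["k"] → Dict.getD with a junk default, total only under Pre_ below.
def get_un_embedded_strings (examples_file : List (List (String × String))) (output_file : List (List (String × String))) : List String :=
  let strings : PySem.Set String := examples_file.foldl (fun s r =>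
    let d := PySem.Dict.mk r
    let s := PySem.Set.add s (d.getD "example" "")
    PySem.Set.add s (d.getD "rewrite" "")) PySem.Set.empty
  output_file.foldl (fun s r =>
    let d := PySem.Dict.mk r
    let s := if d.contains "example_embedding" && PySem.Set.contains s (d.getD "example" "") then
               PySem.Set.discard s (d.getD "example" "") else s
    if d.contains "rewrite_embedding" && PySem.Set.contains s (d.getD "rewrite" "") then
      PySem.Set.discard s (d.getD "rewrite" "") else s) strings

-- ===== PORT B =====
def get_un_embedded_strings_alt (examples_file : List (List (String × String))) (output_file : List (List (String × String))) : List String :=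
  let embedded : PySem.Set String := output_file.foldl (fun e r =>
    let d := PySem.Dict.mk r
    let e := if d.contains "example_embedding" then PySem.Set.add e (d.getD "example" "") else e
    if d.contains "rewrite_embedding" then PySem.Set.add e (d.getD "rewrite" "") else e) PySem.Set.empty
  -- the set comprehension over (record["example"], record["rewrite"]) pairs, filtered by `not in embedded`
  examples_file.foldl (fun s r =>
    let d := PySem.Dict.mk r
    let s := if PySem.Set.contains embedded (d.getD "example" "") then s
             else PySem.Set.add s (d.getD "example" "")
    if PySem.Set.contains embedded (d.getD "rewrite" "") then s
    else PySem.Set.add s (d.getD "rewrite" "")) PySem.Set.empty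

-- ===== PRECONDITION & SPEC =====
-- Pre_ excludes exactly the inputs where the Python A raises KeyError: an examples_file record
-- missing "example"/"rewrite", or an output_file record with an *_embedding key but without the
-- corresponding plain key.
def Pre_get_un_embedded_strings (examples_file : List (List (String × String))) (output_file : List (List (String × String))) : Prop :=
  (examples_file.all (fun r => (PySem.Dict.mk r).contains "example" && (PySem.Dict.mk r).contains "rewrite")
   && output_file.all (fun r =>
        (!(PySem.Dict.mk r).contains "example_embedding" || (PySem.Dict.mk r).contains "example")
        && (!(PySem.Dict.mk r).contains "rewrite_embedding" || (PySem.Dict.mk r).contains "rewrite"))) = true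
instance (examples_file : List (List (String × String))) (output_file : List (List (String × String))) : Decidable (Pre_get_un_embedded_strings examples_file output_file) := by unfold Pre_get_un_embedded_strings; infer_instance

def pvWitness_get_un_embedded_strings : (List (List (String × String))) × (List (List (String × String))) :=
  ([[("example", "a"), ("rewrite", "b")]], [[("example_embedding", "1"), ("example", "a")]])

def Spec_get_un_embedded_strings (examples_file : List (List (String × String))) (output_file : List (List (String × String))) (out : List String) : Prop := out = get_un_embedded_strings_alt examples_file output_file
instance (examples_file : List (List (String × String))) (output_file : List (List (String × String))) (out : List String) : Decidable (Spec_get_un_embedded_strings examples_file output_file out) := by unfold Spec_get_un_embedded_strings; infer_instance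

-- ===== CLAIM (what is proved, stated in full; the proofs are below) =====
def Claim_equal_get_un_embedded_strings : Prop := ∀ (examples_file : List (List (String × String))) (output_file : List (List (String × String))), Dom_get_un_embedded_strings examples_file output_file → Pre_get_un_embedded_strings examples_file output_file → Spec_get_un_embedded_strings examples_file output_file (get_un_embedded_strings examples_file output_file)

-- ===== LEMMAS AND PROOFS =====

-- the strings A's second loop tries to remove / B's first loop marks as embedded, in order
def pvMarks (output_file : List (List (String × String))) : List String :=
  output_file.flatMap (fun r =>
    let d := PySem.Dict.mk r
    (if d.contains "example_embedding" then [d.getD "example" ""] else [])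
      ++ (if d.contains "rewrite_embedding" then [d.getD "rewrite" ""] else []))

theorem pvMarks_cons (r : List (String × String)) (of : List (List (String × String))) :
    pvMarks (r :: of)
      = ((if (PySem.Dict.mk r).contains "example_embedding" then [(PySem.Dict.mk r).getD "example" ""] else [])
          ++ (if (PySem.Dict.mk r).contains "rewrite_embedding" then [(PySem.Dict.mk r).getD "rewrite" ""] else []))
        ++ pvMarks of := by
  simp [pvMarks]

theorem mem_embed_loop (of : List (List (String × String))) (e : List String) (y : String) :
    (y ∈ of.foldl (fun e r =>
      let d := PySem.Dict.mk r
      let e := if d.contains "example_embedding" then PySem.Set.add e (d.getD "example" "") else e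
      if d.contains "rewrite_embedding" then PySem.Set.add e (d.getD "rewrite" "") else e) e)
    ↔ (y ∈ e ∨ y ∈ pvMarks of) := by
  induction of generalizing e with
  | nil => simp [pvMarks]
  | cons r of ih =>
    simp only [List.foldl_cons, ih, pvMarks_cons, List.mem_append]
    by_cases h1 : (PySem.Dict.mk r).contains "example_embedding" = true <;>
      by_cases h2 : (PySem.Dict.mk r).contains "rewrite_embedding" = true <;>
        simp [h1, h2, PySem.Set.mem_add] <;> tauto

theorem cond_discard_eq_filter (c : Bool) (x : String) (s : List String) :
    (if c && PySem.Set.contains s x then PySem.Set.discard s x else s)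
      = s.filter (fun y => !(c && y == x)) := by
  cases c with
  | false => simp
  | true =>
    simp only [Bool.true_and]
    by_cases h : PySem.Set.contains s x = true
    · rw [if_pos h]; unfold PySem.Set.discard; rfl
    · rw [if_neg h]
      have hx : x ∉ s := by simpa [PySem.Set.contains_iff] using h
      refine (List.filter_eq_self.mpr ?_).symm
      intro a ha
      simp only [Bool.not_eq_eq_eq_not, Bool.not_true, beq_eq_false_iff_ne]
      exact fun he => hx (he ▸ ha)

theorem remove_loop_eq_filter (of : List (List (String × String))) (s : List String) :
    of.foldl (fun s r =>
      let d := PySem.Dict.mk r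
      let s := if d.contains "example_embedding" && PySem.Set.contains s (d.getD "example" "") then
                 PySem.Set.discard s (d.getD "example" "") else s
      if d.contains "rewrite_embedding" && PySem.Set.contains s (d.getD "rewrite" "") then
        PySem.Set.discard s (d.getD "rewrite" "") else s) s
    = s.filter (fun y => !(pvMarks of).contains y) := by
  induction of generalizing s with
  | nil =>
    simp only [List.foldl_nil]
    refine (List.filter_eq_self.mpr ?_).symm
    intro a _
    simp [pvMarks]
  | cons r of ih =>
    simp only [List.foldl_cons]
    rw [ih, cond_discard_eq_filter, cond_discard_eq_filter, List.filter_filter, List.filter_filter]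
    apply List.filter_congr
    intro y _
    rw [pvMarks_cons, List.contains_append]
    by_cases h1 : (PySem.Dict.mk r).contains "example_embedding" = true <;>
      by_cases h2 : (PySem.Dict.mk r).contains "rewrite_embedding" = true <;>
        simp [h1, h2, Bool.beq_eq_decide_eq, Bool.and_comm, Bool.and_left_comm]

theorem filter_add_comm (p : String → Bool) (s : List String) (x : String) :
    (PySem.Set.add s x).filter p
      = (if p x then PySem.Set.add (s.filter p) x else s.filter p) := by
  by_cases hm : x ∈ s
  · rw [PySem.Set.add_of_mem hm]
    by_cases hp : p x = true
    · rw [if_pos hp, PySem.Set.add_of_mem (List.mem_filter.mpr ⟨hm, hp⟩)]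
    · simp [hp]
  · rw [PySem.Set.add_of_not_mem hm]
    by_cases hp : p x = true
    · rw [if_pos hp, PySem.Set.add_of_not_mem (fun h => hm (List.mem_filter.mp h).1),
        List.filter_append]
      simp [hp]
    · simp only [Bool.not_eq_true] at hp
      simp [List.filter_append, hp]

theorem collect_loop_filter (p : String → Bool) (ef : List (List (String × String))) (s : List String) :
    (ef.foldl (fun s r =>
      let d := PySem.Dict.mk r
      let s := PySem.Set.add s (d.getD "example" "")
      PySem.Set.add s (d.getD "rewrite" "")) s).filter p
    = ef.foldl (fun s r =>
        let d := PySem.Dict.mk r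
        let s := if p (d.getD "example" "") then PySem.Set.add s (d.getD "example" "") else s
        if p (d.getD "rewrite" "") then PySem.Set.add s (d.getD "rewrite" "") else s) (s.filter p) := by
  induction ef generalizing s with
  | nil => rfl
  | cons r ef ih =>
    simp only [List.foldl_cons]
    rw [ih, filter_add_comm, filter_add_comm]

theorem flip_branches {a : Type} (c : Bool) (x y : a) :
    (if (!c) = true then x else y) = if c = true then y else x := by
  cases c <;> simp

theorem contains_embed_loop (of : List (List (String × String))) (y : String) :
    (PySem.Set.contains (of.foldl (fun e r =>
      let d := PySem.Dict.mk r
      let e := if d.contains "example_embedding" then PySem.Set.add e (d.getD "example" "") else e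
      if d.contains "rewrite_embedding" then PySem.Set.add e (d.getD "rewrite" "") else e)
      PySem.Set.empty) y) = (pvMarks of).contains y := by
  rw [Bool.eq_iff_iff]
  simp only [PySem.Set.contains_iff, List.contains_iff_mem, mem_embed_loop]
  simp [PySem.Set.empty]

-- ===== VERDICT (by name: the statement is the Claim_ definition above) =====
theorem get_un_embedded_strings_spec : Claim_equal_get_un_embedded_strings := by
  unfold Claim_equal_get_un_embedded_strings Spec_get_un_embedded_strings
  intro ef of _ _
  unfold get_un_embedded_strings get_un_embedded_strings_alt
  rw [remove_loop_eq_filter]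
  rw [collect_loop_filter]
  simp only [contains_embed_loop, flip_branches]
  rfl
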